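-- pv_equiv track=rewrite | github.com/shashank-tandan21/Daily-Commute-Optimizer | commute_optimizer/services/alternative_context.py | _generate_alternative_context_summary
-- ===== SOURCE A (Python) =====
-- from typing import List, Dict, Any, Optional, Tuple
--
-- def _generate_alternative_context_summary(alternative_preferences: List[Dict[str, Any]]) -> str:
--     """Generate a summary of alternative context analysis."""
--     if not alternative_preferences:
--         return "No alternatives available for context analysis."
--
--     summary_parts = []
--     summary_parts.append(f"Analysis of {len(alternative_preferences)} alternative routes:")
--
--     # Count alternatives with significant advantages
--     time_alternatives = sum(1 for alt in alternative_preferences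
--                            if any("faster" in adv.lower() for adv in alt.get("key_advantages", [])))
--
--     cost_alternatives = sum(1 for alt in alternative_preferences
--                            if any("cheaper" in adv.lower() for adv in alt.get("key_advantages", [])))
--
--     stress_alternatives = sum(1 for alt in alternative_preferences
--                              if any("stress" in adv.lower() for adv in alt.get("key_advantages", [])))
--
--     reliability_alternatives = sum(1 for alt in alternative_preferences
--                                   if any("reliable" in adv.lower() for adv in alt.get("key_advantages", [])))
--
--     if time_alternatives > 0:
--         summary_parts.append(f"• {time_alternatives} alternative(s) offer time savings")
--
--     if cost_alternatives > 0:
--         summary_parts.append(f"• {cost_alternatives} alternative(s) offer cost savings")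
--
--     if stress_alternatives > 0:
--         summary_parts.append(f"• {stress_alternatives} alternative(s) offer stress reduction")
--
--     if reliability_alternatives > 0:
--         summary_parts.append(f"• {reliability_alternatives} alternative(s) offer better reliability")
--
--     summary_parts.append("Review each alternative's context to make the best choice for your situation.")
--
--     return "\n".join(summary_parts)
-- ===== SOURCE B (Python) =====
-- def _generate_alternative_context_summary(alternative_preferences):
--     """Generate a summary of alternative context analysis."""
--     if not alternative_preferences:
--         return "No alternatives available for context analysis."
--
--     # one pass: four counters, per-alternative flags
--     time_alternatives = cost_alternatives = stress_alternatives = reliability_alternatives = 0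
--     for alt in alternative_preferences:
--         f = c = s = r = False
--         for adv in alt.get("key_advantages", []):
--             low = adv.lower()
--             if "faster" in low:
--                 f = True
--             if "cheaper" in low:
--                 c = True
--             if "stress" in low:
--                 s = True
--             if "reliable" in low:
--                 r = True
--         if f:
--             time_alternatives += 1
--         if c:
--             cost_alternatives += 1
--         if s:
--             stress_alternatives += 1
--         if r:
--             reliability_alternatives += 1
--
--     summary_parts = [f"Analysis of {len(alternative_preferences)} alternative routes:"]
--     if time_alternatives > 0:
--         summary_parts.append(f"• {time_alternatives} alternative(s) offer time savings")
--     if cost_alternatives > 0: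
--         summary_parts.append(f"• {cost_alternatives} alternative(s) offer cost savings")
--     if stress_alternatives > 0:
--         summary_parts.append(f"• {stress_alternatives} alternative(s) offer stress reduction")
--     if reliability_alternatives > 0:
--         summary_parts.append(f"• {reliability_alternatives} alternative(s) offer better reliability")
--     summary_parts.append("Review each alternative's context to make the best choice for your situation.")
--     return "\n".join(summary_parts)
-- ===== Notes on version B (the rewrite author's own statement) =====
-- stated objective: alternative
-- what changed: B replaces A's four independent generator scans over alternative_preferences by a single fused pass that keeps four counters and per-alternative boolean flags set while scanning each alternative's advantage list once.
import Mathlib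
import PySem

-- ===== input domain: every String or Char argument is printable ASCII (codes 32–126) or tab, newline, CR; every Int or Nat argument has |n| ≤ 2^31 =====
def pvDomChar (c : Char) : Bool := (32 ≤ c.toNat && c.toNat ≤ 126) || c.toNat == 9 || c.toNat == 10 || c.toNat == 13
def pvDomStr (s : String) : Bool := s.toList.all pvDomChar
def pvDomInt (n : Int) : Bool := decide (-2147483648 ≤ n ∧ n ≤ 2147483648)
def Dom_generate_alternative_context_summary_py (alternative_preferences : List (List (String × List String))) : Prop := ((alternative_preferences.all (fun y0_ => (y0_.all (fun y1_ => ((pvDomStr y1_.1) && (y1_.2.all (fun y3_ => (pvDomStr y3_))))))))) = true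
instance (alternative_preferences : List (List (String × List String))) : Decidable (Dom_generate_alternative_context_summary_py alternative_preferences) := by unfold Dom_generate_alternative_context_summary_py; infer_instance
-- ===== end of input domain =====

-- B fuses A's four independent scans into one pass with four counters and per-alternative flags (objective: alternative; same strings, same counts).

-- shared dict-lookup helper: alt.get("key_advantages", [])  (first-match association-list lookup)
def pyGetKA (alt : List (String × List String)) : List String :=
  ((alt.find? (fun kv => kv.1 == "key_advantages")).map Prod.snd).getD []

-- ===== PORT A =====
def generate_alternative_context_summary_py (alternative_preferences : List (List (String × List String))) : String :=
  if alternative_preferences = [] then "No alternatives available for context analysis."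
  else
    let time_alternatives : Int := alternative_preferences.foldl
      (fun acc alt => if (pyGetKA alt).any (fun adv => PySem.Str.isIn "faster" (PySem.Str.lower adv)) then acc + 1 else acc) 0
    let cost_alternatives : Int := alternative_preferences.foldl
      (fun acc alt => if (pyGetKA alt).any (fun adv => PySem.Str.isIn "cheaper" (PySem.Str.lower adv)) then acc + 1 else acc) 0
    let stress_alternatives : Int := alternative_preferences.foldl
      (fun acc alt => if (pyGetKA alt).any (fun adv => PySem.Str.isIn "stress" (PySem.Str.lower adv)) then acc + 1 else acc) 0
    let reliability_alternatives : Int := alternative_preferences.foldl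
      (fun acc alt => if (pyGetKA alt).any (fun adv => PySem.Str.isIn "reliable" (PySem.Str.lower adv)) then acc + 1 else acc) 0
    PySem.Str.join "\n"
      (["Analysis of " ++ PySem.Int.toStr (alternative_preferences.length : Int) ++ " alternative routes:"]
        ++ (if time_alternatives > 0 then ["• " ++ PySem.Int.toStr time_alternatives ++ " alternative(s) offer time savings"] else [])
        ++ (if cost_alternatives > 0 then ["• " ++ PySem.Int.toStr cost_alternatives ++ " alternative(s) offer cost savings"] else [])
        ++ (if stress_alternatives > 0 then ["• " ++ PySem.Int.toStr stress_alternatives ++ " alternative(s) offer stress reduction"] else [])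
        ++ (if reliability_alternatives > 0 then ["• " ++ PySem.Int.toStr reliability_alternatives ++ " alternative(s) offer better reliability"] else [])
        ++ ["Review each alternative's context to make the best choice for your situation."])

-- ===== PORT B =====
def generate_alternative_context_summary_py_alt (alternative_preferences : List (List (String × List String))) : String :=
  if alternative_preferences = [] then "No alternatives available for context analysis."
  else
    let counts : Int × Int × Int × Int := alternative_preferences.foldl
      (fun acc alt =>
        let flags : Bool × Bool × Bool × Bool := (pyGetKA alt).foldl
          (fun fl adv =>
            let low := PySem.Str.lower adv
            ((if PySem.Str.isIn "faster" low then true else fl.1),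
             (if PySem.Str.isIn "cheaper" low then true else fl.2.1),
             (if PySem.Str.isIn "stress" low then true else fl.2.2.1),
             (if PySem.Str.isIn "reliable" low then true else fl.2.2.2)))
          (false, false, false, false)
        ((if flags.1 then acc.1 + 1 else acc.1),
         (if flags.2.1 then acc.2.1 + 1 else acc.2.1),
         (if flags.2.2.1 then acc.2.2.1 + 1 else acc.2.2.1),
         (if flags.2.2.2 then acc.2.2.2 + 1 else acc.2.2.2)))
      (0, 0, 0, 0)
    PySem.Str.join "\n"
      (["Analysis of " ++ PySem.Int.toStr (alternative_preferences.length : Int) ++ " alternative routes:"]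
        ++ (if counts.1 > 0 then ["• " ++ PySem.Int.toStr counts.1 ++ " alternative(s) offer time savings"] else [])
        ++ (if counts.2.1 > 0 then ["• " ++ PySem.Int.toStr counts.2.1 ++ " alternative(s) offer cost savings"] else [])
        ++ (if counts.2.2.1 > 0 then ["• " ++ PySem.Int.toStr counts.2.2.1 ++ " alternative(s) offer stress reduction"] else [])
        ++ (if counts.2.2.2 > 0 then ["• " ++ PySem.Int.toStr counts.2.2.2 ++ " alternative(s) offer better reliability"] else [])
        ++ ["Review each alternative's context to make the best choice for your situation."])

-- ===== PRECONDITION & SPEC =====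
def Spec_generate_alternative_context_summary_py (alternative_preferences : List (List (String × List String))) (out : String) : Prop := out = generate_alternative_context_summary_py_alt alternative_preferences
instance (alternative_preferences : List (List (String × List String))) (out : String) : Decidable (Spec_generate_alternative_context_summary_py alternative_preferences out) := by unfold Spec_generate_alternative_context_summary_py; infer_instance

-- ===== CLAIM (what is proved, stated in full; the proofs are below) =====
def Claim_equal_generate_alternative_context_summary_py : Prop := ∀ (alternative_preferences : List (List (String × List String))), Dom_generate_alternative_context_summary_py alternative_preferences → Spec_generate_alternative_context_summary_py alternative_preferences (generate_alternative_context_summary_py alternative_preferences)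

-- ===== LEMMAS AND PROOFS =====

-- the inner flag loop of B computes the four 'any' tests of A
theorem inner_flags (advs : List String) (fl : Bool × Bool × Bool × Bool) :
    advs.foldl
      (fun fl adv =>
        let low := PySem.Str.lower adv
        ((if PySem.Str.isIn "faster" low then true else fl.1),
         (if PySem.Str.isIn "cheaper" low then true else fl.2.1),
         (if PySem.Str.isIn "stress" low then true else fl.2.2.1),
         (if PySem.Str.isIn "reliable" low then true else fl.2.2.2))) fl
    = ((fl.1 || advs.any (fun adv => PySem.Str.isIn "faster" (PySem.Str.lower adv))),
       (fl.2.1 || advs.any (fun adv => PySem.Str.isIn "cheaper" (PySem.Str.lower adv))),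
       (fl.2.2.1 || advs.any (fun adv => PySem.Str.isIn "stress" (PySem.Str.lower adv))),
       (fl.2.2.2 || advs.any (fun adv => PySem.Str.isIn "reliable" (PySem.Str.lower adv)))) := by
  induction advs generalizing fl with
  | nil => simp
  | cons a t ih =>
      rw [List.foldl_cons, ih]
      simp [Bool.or_assoc, Bool.or_left_comm]

-- the outer loop of B computes the four counts of A
theorem outer_counts (aps : List (List (String × List String))) (acc : Int × Int × Int × Int) :
    aps.foldl
      (fun acc alt =>
        let flags : Bool × Bool × Bool × Bool := (pyGetKA alt).foldl
          (fun fl adv =>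
            let low := PySem.Str.lower adv
            ((if PySem.Str.isIn "faster" low then true else fl.1),
             (if PySem.Str.isIn "cheaper" low then true else fl.2.1),
             (if PySem.Str.isIn "stress" low then true else fl.2.2.1),
             (if PySem.Str.isIn "reliable" low then true else fl.2.2.2)))
          (false, false, false, false)
        ((if flags.1 then acc.1 + 1 else acc.1),
         (if flags.2.1 then acc.2.1 + 1 else acc.2.1),
         (if flags.2.2.1 then acc.2.2.1 + 1 else acc.2.2.1),
         (if flags.2.2.2 then acc.2.2.2 + 1 else acc.2.2.2))) acc
    = ((aps.foldl (fun a alt => if (pyGetKA alt).any (fun adv => PySem.Str.isIn "faster" (PySem.Str.lower adv)) then a + 1 else a) acc.1),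
       (aps.foldl (fun a alt => if (pyGetKA alt).any (fun adv => PySem.Str.isIn "cheaper" (PySem.Str.lower adv)) then a + 1 else a) acc.2.1),
       (aps.foldl (fun a alt => if (pyGetKA alt).any (fun adv => PySem.Str.isIn "stress" (PySem.Str.lower adv)) then a + 1 else a) acc.2.2.1),
       (aps.foldl (fun a alt => if (pyGetKA alt).any (fun adv => PySem.Str.isIn "reliable" (PySem.Str.lower adv)) then a + 1 else a) acc.2.2.2)) := by
  induction aps generalizing acc with
  | nil => rfl
  | cons alt t ih =>
      rw [List.foldl_cons, ih]
      simp only [inner_flags, Bool.false_or]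
      rfl

-- ===== VERDICT (by name: the statement is the Claim_ definition above) =====
theorem generate_alternative_context_summary_py_spec : Claim_equal_generate_alternative_context_summary_py := by
  intro aps _
  unfold Spec_generate_alternative_context_summary_py
  unfold generate_alternative_context_summary_py generate_alternative_context_summary_py_alt
  by_cases h : aps = []
  · simp [h]
  · simp only [h, if_false]
    rw [outer_counts]
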